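-- pv_equiv track=rewrite | github.com/vecker1/kuki_rep | 1er semestre 2024/Trabajo2_Alg_Mejor_verison2.py | construct_solution
-- ===== SOURCE A (Python) =====
-- def construct_solution(C, P, str):
--     n = len(str)
--     result = []
--     cuts = []
--
--     def add_cuts(i, j):
--         if i >= j or P[i][j]:
--             result.append(str[i:j+1])
--             return
--         for k in range(i, j):
--             if C[i][j] == C[i][k] + C[k + 1][j] + 1:
--                 cuts.append(k + 1)
--                 add_cuts(i, k)
--                 add_cuts(k + 1, j)
--                 break
--
--     add_cuts(0, n - 1)
--     return '-'.join(result), len(cuts)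
-- ===== SOURCE B (Python) =====
-- def construct_solution(C, P, str):
--     # Explicit stack processed RIGHT-to-LEFT (right child popped first), each segment
--     # PREPENDED to the result list, and the first matching k found with next()/range.
--     n = len(str)
--     stack = [(0, n - 1)]
--     result = []
--     num_cuts = 0
--     while stack:
--         i, j = stack.pop()
--         if i >= j or P[i][j]:
--             result = [str[i:j + 1]] + result
--             continue
--         k = next((k for k in range(i, j)
--                   if C[i][j] == C[i][k] + C[k + 1][j] + 1), None)
--         if k is not None:
--             num_cuts += 1
--             stack.append((i, k))
--             stack.append((k + 1, j))
--     return '-'.join(result), num_cuts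
-- ===== Notes on version B (the rewrite author's own statement) =====
-- stated objective: alternative
-- what changed: Replaced the recursive closure mutating shared result/cuts lists with an explicit stack of intervals processed right-to-left, prepending each finished segment to the result list and locating the first matching cut k with a library first-match search (next over range) instead of a for/break loop.
import Mathlib
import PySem

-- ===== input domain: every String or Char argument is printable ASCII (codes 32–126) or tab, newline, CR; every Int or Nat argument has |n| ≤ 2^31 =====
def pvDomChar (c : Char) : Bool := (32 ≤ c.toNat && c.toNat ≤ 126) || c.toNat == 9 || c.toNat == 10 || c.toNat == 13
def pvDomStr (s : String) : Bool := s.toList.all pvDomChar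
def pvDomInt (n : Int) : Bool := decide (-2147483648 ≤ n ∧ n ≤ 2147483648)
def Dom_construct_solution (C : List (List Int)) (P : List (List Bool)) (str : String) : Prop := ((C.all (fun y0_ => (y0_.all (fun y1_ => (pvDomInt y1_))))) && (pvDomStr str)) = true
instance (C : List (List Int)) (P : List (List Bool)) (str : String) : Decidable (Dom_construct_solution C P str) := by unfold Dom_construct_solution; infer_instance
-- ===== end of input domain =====

-- B replaces A's recursive closure by an explicit stack processed right-to-left, prepending
-- segments and finding the cut with a library first-match search (objective: alternative
-- decomposition, same cost). Equality of the RETURN value is proved.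

-- ===== PORT A =====
-- table reads of A; on Pre_ inputs every visited index is in range, so getD is exact
def pvC (C : List (List Int)) (i j : Nat) : Int := (C.getD i []).getD j 0
def pvP (P : List (List Bool)) (i j : Nat) : Bool := (P.getD i []).getD j false

-- A's inner 'for k in range(i, j): … break', walked over the range list
-- (Python's range(i, j) is exactly List.range' i (j - i) for these Nat bounds)
def pvFindK_A (C : List (List Int)) (i j : Nat) : List Nat → Option Nat
  | [] => none
  | k :: ks =>
    if pvC C i j = pvC C i k + pvC C (k + 1) j + 1 then some k
    else pvFindK_A C i j ks

-- A's add_cuts: returns the segments appended to result and the cuts appended, in order.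
-- The Nat argument is fuel that only makes the recursion total; it is never exhausted
-- with the fuel construct_solution supplies (proved in the adequacy lemmas below).
def construct_solution_go (C : List (List Int)) (P : List (List Bool)) (s : String) : Nat → Nat → Nat → List String × List Int
  | 0, _, _ => ([], [])
  | d + 1, i, j =>
    if i ≥ j || pvP P i j then ([PySem.Str.slice s (some (i : Int)) (some ((j : Int) + 1))], [])
    else
      match pvFindK_A C i j (List.range' i (j - i)) with
      | some k =>
          let l := construct_solution_go C P s d i k
          let r := construct_solution_go C P s d (k + 1) j
          (l.1 ++ r.1, ((k : Int) + 1) :: (l.2 ++ r.2))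
      | none => ([], [])

def construct_solution (C : List (List Int)) (P : List (List Bool)) (str : String) : String × Int :=
  let n := str.toList.length
  let r := construct_solution_go C P str (n + 1) 0 (n - 1)
  (PySem.Str.join "-" r.1, (r.2.length : Int))

-- ===== PORT B =====
-- Source B's while loop: pop the top interval, prepend finished segments, push left then right;
-- Source B's `next((k for k in range(i, j) if …), None)` is List.find? over List.range' i (j - i).
-- The Nat argument is fuel that only makes the loop total; it is never exhausted with the
-- fuel construct_solution_alt supplies (proved in the adequacy lemmas below).
def construct_solution_alt_loop (C : List (List Int)) (P : List (List Bool)) (s : String) :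
    Nat → List (Nat × Nat) → List String → Nat → List String × Nat
  | 0, _, result, cuts => (result, cuts)
  | _ + 1, [], result, cuts => (result, cuts)
  | f + 1, (i, j) :: stack, result, cuts =>
    if i ≥ j || (P.getD i []).getD j false then
      construct_solution_alt_loop C P s f stack (PySem.Str.slice s (some (i : Int)) (some ((j : Int) + 1)) :: result) cuts
    else
      match List.find? (fun k => decide ((C.getD i []).getD j 0 = (C.getD i []).getD k 0 + (C.getD (k + 1) []).getD j 0 + 1)) (List.range' i (j - i)) with
      | some k => construct_solution_alt_loop C P s f ((k + 1, j) :: (i, k) :: stack) result (cuts + 1)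
      | none => construct_solution_alt_loop C P s f stack result cuts

def construct_solution_alt (C : List (List Int)) (P : List (List Bool)) (str : String) : String × Int :=
  let n := str.toList.length
  let r := construct_solution_alt_loop C P str (2 * n + 2) [(0, n - 1)] [] 0
  (PySem.Str.join "-" r.1, (r.2 : Int))

-- ===== PRECONDITION & SPEC =====
-- Pre_ excludes inputs whose DP tables C/P are smaller than n×n (n = len(str), beyond the
-- immediately read corner entry P[0][n-1]); on those A generally raises IndexError, and where
-- it happens to return early B returns the same value anyway.
def Pre_construct_solution (C : List (List Int)) (P : List (List Bool)) (str : String) : Prop :=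
  let n := str.toList.length
  n ≤ 1 ∨
  (1 ≤ P.length ∧ n ≤ (P.getD 0 []).length ∧ (P.getD 0 []).getD (n - 1) false = true) ∨
  (n ≤ C.length ∧ (∀ r ∈ C, n ≤ r.length) ∧ n ≤ P.length ∧ (∀ r ∈ P, n ≤ r.length))
instance (C : List (List Int)) (P : List (List Bool)) (str : String) : Decidable (Pre_construct_solution C P str) := by unfold Pre_construct_solution; infer_instance

def pvWitness_construct_solution : List (List Int) × List (List Bool) × String :=
  ([[0, 1], [0, 0]], [[true, false], [false, true]], "ab")

def Spec_construct_solution (C : List (List Int)) (P : List (List Bool)) (str : String) (out : String × Int) : Prop := out = construct_solution_alt C P str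
instance (C : List (List Int)) (P : List (List Bool)) (str : String) (out : String × Int) : Decidable (Spec_construct_solution C P str out) := by unfold Spec_construct_solution; infer_instance

-- ===== CLAIM (what is proved, stated in full; the proofs are below) =====
def Claim_equal_construct_solution : Prop := ∀ (C : List (List Int)) (P : List (List Bool)) (str : String), Dom_construct_solution C P str → Pre_construct_solution C P str → Spec_construct_solution C P str (construct_solution C P str)

-- ===== LEMMAS AND PROOFS =====

-- A's hand scan = find? over the same list
theorem pvFindK_A_eq_find? (C : List (List Int)) (i j : Nat) : ∀ ks : List Nat,
    pvFindK_A C i j ks = List.find? (fun k => decide ((C.getD i []).getD j 0 = (C.getD i []).getD k 0 + (C.getD (k + 1) []).getD j 0 + 1)) ks := by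
  intro ks
  induction ks with
  | nil => rfl
  | cons k ks ih =>
    rw [pvFindK_A, List.find?_cons]
    by_cases hc : pvC C i j = pvC C i k + pvC C (k + 1) j + 1
    · rw [if_pos hc]
      simp only [pvC] at hc
      rw [decide_eq_true hc]
    · rw [if_neg hc]
      simp only [pvC] at hc
      rw [decide_eq_false hc]
      exact ih

-- a hit of the first-k search lies inside the scanned range
theorem pvKBound {p : Nat → Bool} {i m k : Nat} (h : List.find? p (List.range' i m) = some k) : i ≤ k ∧ k < i + m := by
  have hmem := List.mem_of_find?_eq_some h
  rw [List.mem_range'_1] at hmem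
  exact hmem

-- idealised (fuel-free) form of A's recursion, used only in the proofs
def pvGoW (C : List (List Int)) (P : List (List Bool)) (s : String) (i j : Nat) : List String × List Int :=
  if i ≥ j || pvP P i j then ([PySem.Str.slice s (some (i : Int)) (some ((j : Int) + 1))], [])
  else
    match h : List.find? (fun k => decide ((C.getD i []).getD j 0 = (C.getD i []).getD k 0 + (C.getD (k + 1) []).getD j 0 + 1)) (List.range' i (j - i)) with
    | some k =>
        let l := pvGoW C P s i k
        let r := pvGoW C P s (k + 1) j
        (l.1 ++ r.1, ((k : Int) + 1) :: (l.2 ++ r.2))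
    | none => ([], [])
termination_by j - i
decreasing_by all_goals (have hb := pvKBound h; omega)

-- A's fuel is adequate: with more fuel than the interval width, go computes pvGoW
theorem go_adequate (C : List (List Int)) (P : List (List Bool)) (s : String) :
    ∀ d i j, j - i < d → construct_solution_go C P s d i j = pvGoW C P s i j := by
  intro d
  induction d using Nat.strong_induction_on with
  | _ d ih =>
    intro i j hd
    match d, hd with
    | e + 1, hd =>
      rw [construct_solution_go, pvGoW]
      by_cases hc : (i ≥ j || pvP P i j) = true
      · rw [if_pos hc, if_pos hc]
      · rw [if_neg hc, if_neg hc, pvFindK_A_eq_find?]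
        split
        · rename_i k h'
          have hb := pvKBound h'
          rw [ih e (by omega) i k (by omega), ih e (by omega) (k + 1) j (by omega)]
          split
          · rename_i k2 h2
            rw [h'] at h2; injection h2 with h2; subst h2; rfl
          · rename_i h2; rw [h'] at h2; cases h2
        · rename_i h'
          split
          · rename_i k2 h2; rw [h'] at h2; cases h2
          · rfl

-- idealised (fuel-free) form of B's loop, and the fuel weight of a stack
def pvLoopW (C : List (List Int)) (P : List (List Bool)) (s : String) :
    List (Nat × Nat) → List String → Nat → List String × Nat
  | [], result, cuts => (result, cuts)
  | (i, j) :: stack, result, cuts =>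
    if i ≥ j || (P.getD i []).getD j false then
      pvLoopW C P s stack (PySem.Str.slice s (some (i : Int)) (some ((j : Int) + 1)) :: result) cuts
    else
      match h : List.find? (fun k => decide ((C.getD i []).getD j 0 = (C.getD i []).getD k 0 + (C.getD (k + 1) []).getD j 0 + 1)) (List.range' i (j - i)) with
      | some k => pvLoopW C P s ((k + 1, j) :: (i, k) :: stack) result (cuts + 1)
      | none => pvLoopW C P s stack result cuts
termination_by st _ _ => st.length + 2 * (st.map (fun p => p.2 - p.1)).sum
decreasing_by all_goals (first
  | (have hb := pvKBound h; simp only [List.map_cons, List.sum_cons, List.length_cons]; omega)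
  | (simp only [List.map_cons, List.sum_cons, List.length_cons]; omega))

def pvW : List (Nat × Nat) → Nat
  | [] => 0
  | (i, j) :: st => 2 * (j - i) + 1 + pvW st

-- B's fuel is adequate: with at least the stack's weight of fuel, the loop computes pvLoopW
theorem loop_adequate (C : List (List Int)) (P : List (List Bool)) (s : String) :
    ∀ f st acc cnt, pvW st ≤ f → construct_solution_alt_loop C P s f st acc cnt = pvLoopW C P s st acc cnt := by
  intro f
  induction f with
  | zero =>
    intro st acc cnt hf
    match st with
    | [] => rw [construct_solution_alt_loop, pvLoopW]
    | (i, j) :: st => simp [pvW] at hf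
  | succ f ih =>
    intro st acc cnt hf
    match st with
    | [] => rw [construct_solution_alt_loop, pvLoopW]
    | (i, j) :: st =>
      simp only [pvW] at hf
      rw [construct_solution_alt_loop, pvLoopW]
      by_cases hc : (i ≥ j || (P.getD i []).getD j false) = true
      · rw [if_pos hc, if_pos hc, ih _ _ _ (by omega)]
      · rw [if_neg hc, if_neg hc]
        split
        · rename_i k h'
          have hb := pvKBound h'
          split
          · rename_i k2 h2
            rw [h'] at h2; injection h2 with h2; subst h2
            exact ih _ _ _ (by simp only [pvW]; omega)
          · rename_i h2; rw [h'] at h2; cases h2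
        · rename_i h'
          split
          · rename_i k2 h2; rw [h'] at h2; cases h2
          · exact ih _ _ _ (by omega)

-- processing the top interval fully prepends exactly A's segments for it, in order
theorem loopW_go (C : List (List Int)) (P : List (List Bool)) (s : String) :
    ∀ d i j rest acc cnt, j - i ≤ d →
      pvLoopW C P s ((i, j) :: rest) acc cnt =
        pvLoopW C P s rest ((pvGoW C P s i j).1 ++ acc)
          (cnt + (pvGoW C P s i j).2.length) := by
  intro d
  induction d using Nat.strong_induction_on with
  | _ d ih =>
    intro i j rest acc cnt hd
    by_cases hc : (i ≥ j || (P.getD i []).getD j false) = true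
    · have hc' : (i ≥ j || pvP P i j) = true := hc
      rw [pvLoopW, if_pos hc, pvGoW, if_pos hc']; rfl
    · have hc' : ¬ (i ≥ j || pvP P i j) = true := hc
      rw [pvLoopW, if_neg hc, pvGoW, if_neg hc']
      split
      · rename_i k h'
        have hb := pvKBound h'
        rw [ih (j - (k + 1)) (by omega) (k + 1) j _ _ _ (by omega)]
        rw [ih (k - i) (by omega) i k _ _ _ (by omega)]
        congr 1
        · simp
        · simp only [List.length_cons, List.length_append]
          omega
      · rename_i h'
        simp

-- ===== VERDICT (by name: the statement is the Claim_ definition above) =====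
theorem construct_solution_spec : Claim_equal_construct_solution := by
  intro C P str _ _
  unfold Spec_construct_solution construct_solution construct_solution_alt
  simp only
  rw [go_adequate C P str (str.toList.length + 1) 0 (str.toList.length - 1) (by omega)]
  rw [loop_adequate C P str (2 * str.toList.length + 2) [(0, str.toList.length - 1)] [] 0
    (by simp only [pvW]; omega)]
  rw [loopW_go C P str (str.toList.length - 1) 0 (str.toList.length - 1) [] [] 0 (by omega)]
  simp [pvLoopW]
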